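-- pv_equiv track=rewrite | github.com/sgao26/pract-coding | python/legal-log.py | legalbacklog
-- ===== SOURCE A (Python) =====
-- def legalbacklog(cases, max_daily_sessions):
-- 	sessions = list(cases.values())
-- 	sessions.sort(reverse=True)
-- 	activecases = len(sessions)
-- 	daycount = 0
-- 	while activecases > 0:
-- 		for i in range(min(activecases, max_daily_sessions)):
-- 			sessions[i] -= 1
-- 			if sessions[i] == 0:
-- 				activecases -= 1
-- 		sessions.sort(reverse=True)
-- 		daycount += 1
-- 	return daycount
-- ===== SOURCE B (Python) =====
-- def legalbacklog(cases, max_daily_sessions):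
--     sessions = list(cases.values())
--     if not sessions:
--         return 0
--     return max(max(sessions), -(-sum(sessions) // max_daily_sessions))
-- ===== Notes on version B (the rewrite author's own statement) =====
-- stated objective: faster
-- what changed: Replaces the day-by-day simulation (each day: sort descending, decrement the top min(n,k) sessions, re-sort, count the day) by the closed form max(max(sessions), ceil(sum(sessions)/k)) computed in one pass.
import Mathlib
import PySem

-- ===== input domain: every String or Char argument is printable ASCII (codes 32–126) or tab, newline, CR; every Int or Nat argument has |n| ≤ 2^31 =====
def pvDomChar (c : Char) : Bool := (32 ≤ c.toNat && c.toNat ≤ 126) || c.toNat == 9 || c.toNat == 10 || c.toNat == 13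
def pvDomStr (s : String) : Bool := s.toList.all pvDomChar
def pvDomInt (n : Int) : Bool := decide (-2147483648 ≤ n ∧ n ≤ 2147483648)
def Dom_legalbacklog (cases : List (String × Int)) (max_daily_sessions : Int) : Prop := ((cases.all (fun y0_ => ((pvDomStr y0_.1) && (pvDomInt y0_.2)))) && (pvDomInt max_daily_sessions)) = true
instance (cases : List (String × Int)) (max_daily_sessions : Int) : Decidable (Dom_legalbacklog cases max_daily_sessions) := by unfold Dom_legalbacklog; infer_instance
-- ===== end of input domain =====

-- B replaces A's day-by-day simulation (sort descending, decrement the top min(n,k) sessions,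
-- repeat) by the closed form max(max(sessions), ceil(sum(sessions)/k)); objective: faster.

-- ===== PORT A =====
-- A's while loop; the fuel argument only makes the recursion total and is sufficient
-- on every input Pre_ admits (outside Pre_ the Python loop never terminates)
def legalbacklogLoop (k : Int) : Nat → List Int → Int → Int → Int
  | 0, _, _, daycount => daycount
  | fuel+1, sessions, activecases, daycount =>
    if activecases > 0 then
      let st := (PySem.List.pyRange 0 (min activecases k) 1).foldl
        (fun (st : List Int × Int) i =>
          let s1 := PySem.List.pySetD st.1 i (PySem.List.pyGetD st.1 i 0 - 1)
          (s1, if PySem.List.pyGetD s1 i 0 = 0 then st.2 - 1 else st.2))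
        (sessions, activecases)
      legalbacklogLoop k fuel (PySem.List.sorted st.1 (fun x => x) true) st.2 (daycount + 1)
    else daycount

def legalbacklog (cases : List (String × Int)) (max_daily_sessions : Int) : Int :=
  let sessions0 := (PySem.Dict.ofList cases).values
  let sessions := PySem.List.sorted sessions0 (fun x => x) true
  legalbacklogLoop max_daily_sessions ((sessions.map Int.toNat).sum + 1) sessions
    (sessions.length : Int) 0

-- ===== PORT B =====
def legalbacklog_alt (cases : List (String × Int)) (max_daily_sessions : Int) : Int :=
  let sessions := (PySem.Dict.ofList cases).values
  if sessions.isEmpty then 0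
  else
    max ((PySem.List.max? sessions (fun y => y)).getD 0)
      (-(PySem.Int.floordiv (-(sessions.sum)) max_daily_sessions))

-- ===== PRECONDITION & SPEC =====
-- Pre_ = exactly the inputs on which the Python A terminates: A loops forever when some case
-- requires a nonpositive number of sessions (decrementing it never reaches 0) or when the
-- docket is nonempty but max_daily_sessions < 1 (no session is ever held).
def Pre_legalbacklog (cases : List (String × Int)) (max_daily_sessions : Int) : Prop :=
  (cases = [] ∨ 1 ≤ max_daily_sessions) ∧ ∀ v ∈ (PySem.Dict.ofList cases).values, 1 ≤ v
instance (cases : List (String × Int)) (max_daily_sessions : Int) : Decidable (Pre_legalbacklog cases max_daily_sessions) := by unfold Pre_legalbacklog; infer_instance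

def pvWitness_legalbacklog : (List (String × Int)) × Int := ([("a", 2), ("b", 1)], 1)

def Spec_legalbacklog (cases : List (String × Int)) (max_daily_sessions : Int) (out : Int) : Prop := out = legalbacklog_alt cases max_daily_sessions
instance (cases : List (String × Int)) (max_daily_sessions : Int) (out : Int) : Decidable (Spec_legalbacklog cases max_daily_sessions out) := by unfold Spec_legalbacklog; infer_instance

-- ===== CLAIM (what is proved, stated in full; the proofs are below) =====
def Claim_equal_legalbacklog : Prop := ∀ (cases : List (String × Int)) (max_daily_sessions : Int), Dom_legalbacklog cases max_daily_sessions → Pre_legalbacklog cases max_daily_sessions → Spec_legalbacklog cases max_daily_sessions (legalbacklog cases max_daily_sessions)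

-- ===== LEMMAS AND PROOFS =====

-- the two ingredients of the closed form: running max with floor 0, and ceiling division
def pvFmax (l : List Int) : Int := l.foldr max 0
def pvCdiv (a k : Int) : Int := -(PySem.Int.floordiv (-a) k)
def pvG (l : List Int) (k : Int) : Int := max (pvFmax l) (pvCdiv l.sum k)
-- the number of sessions A holds on one day, and the session list after that day (unsorted)
def pvM (s : List Int) (k : Int) : Nat := (min ((s.countP (fun x => decide (0 < x)) : Int)) k).toNat
def pvStep (s : List Int) (k : Int) : List Int :=
  (s.take (pvM s k)).map (· - 1) ++ s.drop (pvM s k)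

theorem pvFmax_nonneg (l : List Int) : 0 ≤ pvFmax l := by
  induction l with
  | nil => simp [pvFmax]
  | cons x t ih => simp only [pvFmax, List.foldr] at *; omega

theorem pvFmax_le (l : List Int) (b : Int) (hb : 0 ≤ b) (h : ∀ x ∈ l, x ≤ b) : pvFmax l ≤ b := by
  induction l with
  | nil => simpa [pvFmax]
  | cons x t ih =>
    have h1 := h x (by simp)
    have h2 := ih (fun y hy => h y (by simp [hy]))
    simp only [pvFmax, List.foldr] at *; omega

theorem le_pvFmax (l : List Int) (x : Int) (h : x ∈ l) : x ≤ pvFmax l := by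
  induction l with
  | nil => simp at h
  | cons y t ih =>
    rcases List.mem_cons.1 h with rfl | h
    · simp only [pvFmax, List.foldr]; omega
    · have := ih h; simp only [pvFmax, List.foldr] at *; omega

theorem pvFmax_append (l₁ l₂ : List Int) : pvFmax (l₁ ++ l₂) = max (pvFmax l₁) (pvFmax l₂) := by
  induction l₁ with
  | nil => have := pvFmax_nonneg l₂; simp only [pvFmax, List.foldr, List.nil_append] at *; omega
  | cons x t ih => simp only [pvFmax, List.foldr, List.cons_append] at *; omega

theorem pvFmax_head (x : Int) (t : List Int) (hx : 0 ≤ x) (h : ∀ y ∈ t, y ≤ x) :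
    pvFmax (x :: t) = x := by
  have := pvFmax_le t x hx h
  simp only [pvFmax, List.foldr] at *; omega

theorem pvFmax_zero (l : List Int) (h : ∀ x ∈ l, x = 0) : pvFmax l = 0 :=
  le_antisymm (pvFmax_le l 0 le_rfl (fun x hx => (h x hx).le)) (pvFmax_nonneg l)

theorem pvFmax_mem (l : List Int) : pvFmax l = 0 ∨ pvFmax l ∈ l := by
  induction l with
  | nil => simp [pvFmax]
  | cons x t ih =>
    simp only [pvFmax, List.foldr] at *
    rcases le_total x (t.foldr max 0) with h | h
    · rcases ih with h0 | hm
      · left; omega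
      · right; rw [max_eq_right h]; exact List.mem_cons_of_mem _ hm
    · right; rw [max_eq_left h]; exact List.mem_cons_self

theorem pvFmax_perm (l l' : List Int) (h : l.Perm l') : pvFmax l = pvFmax l' := by
  apply le_antisymm
  · rcases pvFmax_mem l with h0 | hm
    · rw [h0]; exact pvFmax_nonneg l'
    · exact le_pvFmax l' _ (h.mem_iff.1 hm)
  · rcases pvFmax_mem l' with h0 | hm
    · rw [h0]; exact pvFmax_nonneg l
    · exact le_pvFmax l _ (h.mem_iff.2 hm)

theorem pvCdiv_le_iff (a k q : Int) (hk : 0 < k) : pvCdiv a k ≤ q ↔ a ≤ q * k := by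
  unfold pvCdiv
  rw [PySem.Int.floordiv_eq_ediv_of_pos hk, neg_le, Int.le_ediv_iff_mul_le hk, neg_mul,
    neg_le_neg_iff]

theorem le_pvCdiv_iff (a k q : Int) (hk : 0 < k) : q ≤ pvCdiv a k ↔ (q - 1) * k < a := by
  have h := pvCdiv_le_iff a k (q - 1) hk
  constructor
  · intro hq
    by_contra hna
    push_neg at hna
    have := h.2 hna
    omega
  · intro hq
    by_contra hna
    push_neg at hna
    have := h.1 (by omega)
    omega

theorem pvCdiv_sub_k (a k : Int) (hk : 0 < k) : pvCdiv (a - k) k = pvCdiv a k - 1 := by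
  unfold pvCdiv
  rw [PySem.Int.floordiv_eq_ediv_of_pos hk, PySem.Int.floordiv_eq_ediv_of_pos hk]
  have h : -(a - k) = -a + 1 * k := by ring
  rw [h, Int.add_mul_ediv_right _ _ (by omega : k ≠ 0)]
  ring

theorem pvCdiv_zero (k : Int) (hk : 0 < k) : pvCdiv 0 k = 0 := by
  unfold pvCdiv
  rw [PySem.Int.floordiv_eq_ediv_of_pos hk]
  simp

theorem pvG_nonneg (l : List Int) (k : Int) : 0 ≤ pvG l k :=
  le_trans (pvFmax_nonneg l) (le_max_left _ _)

theorem pvG_perm (l l' : List Int) (k : Int) (h : l.Perm l') : pvG l k = pvG l' k := by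
  simp [pvG, pvFmax_perm l l' h, h.sum_eq]

theorem sum_zero_of (l : List Int) (h : ∀ x ∈ l, x = 0) : l.sum = 0 := by
  induction l with
  | nil => rfl
  | cons x t ih => simp [h x (by simp), ih (fun y hy => h y (by simp [hy]))]

theorem sum_toNat_eq (l : List Int) (h : ∀ x ∈ l, 0 ≤ x) :
    ((l.map Int.toNat).sum : Int) = l.sum := by
  induction l with
  | nil => rfl
  | cons x t ih =>
    have hx := h x (by simp)
    have iht := ih (fun y hy => h y (by simp [hy]))
    simp only [List.map_cons, List.sum_cons, Nat.cast_add]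
    rw [Int.toNat_of_nonneg hx, iht]

theorem sum_map_dec (l : List Int) : (l.map (· - 1)).sum = l.sum - l.length := by
  induction l with
  | nil => simp
  | cons x t ih =>
    simp only [List.map_cons, List.sum_cons, List.length_cons, ih]
    push_cast
    ring

theorem aux_count (l : List Int) (h : ∀ x ∈ l, 1 ≤ x) :
    l.countP (fun x => decide (1 < x)) + l.count 1 = l.length := by
  induction l with
  | nil => simp
  | cons x t ih =>
    have hx := h x (by simp)
    have iht := ih (fun y hy => h y (by simp [hy]))
    simp only [List.countP_cons, List.count_cons, List.length_cons]
    by_cases h1 : x = 1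
    · subst h1
      simp
      omega
    · have hgt : (1:Int) < x := by omega
      simp [hgt, h1]
      omega

theorem getD_append_len (A B : List Int) (v : Int) : (A ++ v :: B).getD A.length 0 = v := by
  induction A with
  | nil => rfl
  | cons x t ih => simpa using ih

theorem set_append_len (A B : List Int) (v w : Int) :
    (A ++ v :: B).set A.length w = A ++ w :: B := by
  induction A with
  | nil => rfl
  | cons x t ih => simp [ih]

-- a descending-sorted nonnegative list is positives ++ zeros, with countP the positive count
theorem desc_split (s : List Int) (hs : s.Pairwise (fun a b => b ≤ a)) (h0 : ∀ x ∈ s, 0 ≤ x) :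
    ∃ P Z, s = P ++ Z ∧ (∀ x ∈ P, 0 < x) ∧ (∀ x ∈ Z, x = 0) ∧
      P.length = s.countP (fun x => decide (0 < x)) := by
  induction s with
  | nil => exact ⟨[], [], by simp⟩
  | cons x t ih =>
    obtain ⟨hxt, ht⟩ := List.pairwise_cons.1 hs
    have hx0 := h0 x (by simp)
    by_cases hx : 0 < x
    · obtain ⟨P, Z, heq, hP, hZ, hlen⟩ := ih ht (fun y hy => h0 y (by simp [hy]))
      refine ⟨x :: P, Z, by simp [heq], ?_, hZ, ?_⟩
      · intro y hy
        rcases List.mem_cons.1 hy with rfl | hy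
        · exact hx
        · exact hP y hy
      · simp [List.countP_cons, hx, hlen]
    · have hx0' : x = 0 := by omega
      have hall : ∀ y ∈ x :: t, y = 0 := by
        intro y hy
        rcases List.mem_cons.1 hy with rfl | hy
        · exact hx0'
        · have := hxt y hy
          have := h0 y (by simp [hy])
          omega
      refine ⟨[], x :: t, by simp, by simp, hall, ?_⟩
      rw [eq_comm, List.length_nil, List.countP_eq_zero]
      intro a ha
      simp [hall a ha]

-- one day of A's simulation: pvG drops by exactly 1, the active count by the number of 1s served
theorem day_step (s : List Int) (k : Int)
    (hs : s.Pairwise (fun a b => b ≤ a)) (h0 : ∀ x ∈ s, 0 ≤ x) (hk : 1 ≤ k)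
    (ha : 0 < s.countP (fun x => decide (0 < x))) :
    (∀ x ∈ pvStep s k, 0 ≤ x) ∧
    (pvStep s k).countP (fun x => decide (0 < x)) + (s.take (pvM s k)).count 1
      = s.countP (fun x => decide (0 < x)) ∧
    pvG (pvStep s k) k = pvG s k - 1 := by
  obtain ⟨P, Z, heq, hP, hZ, hlen⟩ := desc_split s hs h0
  subst heq
  have hP1 : ∀ x ∈ P, 1 ≤ x := fun x hx => by have := hP x hx; omega
  have hc : (P ++ Z).countP (fun x => decide (0 < x)) = P.length := hlen.symm
  have ha' : 0 < P.length := by omega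
  obtain ⟨m, hm⟩ : ∃ m, pvM (P ++ Z) k = m := ⟨_, rfl⟩
  have hm1 : 1 ≤ m := by rw [← hm]; unfold pvM; rw [hc]; omega
  have hmn : m ≤ P.length := by rw [← hm]; unfold pvM; rw [hc]; omega
  have hmin : ((m : Nat) : Int) = min (↑P.length) k := by rw [← hm]; unfold pvM; rw [hc]; omega
  have htk : (P ++ Z).take m = P.take m := List.take_append_of_le_length (by omega)
  have hdr : (P ++ Z).drop m = P.drop m ++ Z := List.drop_append_of_le_length (by omega)
  have hstep : pvStep (P ++ Z) k = (P.take m).map (· - 1) ++ (P.drop m ++ Z) := by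
    unfold pvStep
    rw [hm, htk, hdr]
  have hsP : P.Pairwise (fun a b => b ≤ a) :=
    List.Pairwise.sublist (List.sublist_append_left _ _) hs
  have hg := List.pairwise_iff_getElem.1 hsP
  have hmono : ∀ (i j : Nat), i ≤ j → j < P.length → P[j]! ≤ P[i]! := by
    intro i j hij hj
    rw [getElem!_pos P i (by omega), getElem!_pos P j (by omega)]
    rcases Nat.lt_or_ge i j with h | h
    · exact hg i j (by omega) (by omega) h
    · have hij' : i = j := by omega
      subst hij'
      exact le_rfl
  have hmemdrop : ∀ (j : Nat), j < P.length → ∀ y ∈ P.drop j, y ≤ P[j]! := by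
    intro j hj y hy
    obtain ⟨i, hi, rfl⟩ := List.mem_iff_getElem.1 hy
    have hi' : j + i < P.length := by
      rw [List.length_drop] at hi
      omega
    rw [List.getElem_drop, ← getElem!_pos P (j + i) hi']
    exact hmono j (j + i) (by omega) hi'
  have hmemtake : ∀ (j : Nat), j < P.length → ∀ y ∈ P.take (j + 1), P[j]! ≤ y := by
    intro j hj y hy
    obtain ⟨i, hi, rfl⟩ := List.mem_iff_getElem.1 hy
    have hi2 : i < P.length := by
      rw [List.length_take] at hi
      omega
    have hi3 : i ≤ j := by
      rw [List.length_take] at hi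
      omega
    rw [List.getElem_take, ← getElem!_pos P i hi2]
    exact hmono i j hi3 hj
  have hdrop0 : P = P[0]! :: P.drop 1 := by
    rw [getElem!_pos P 0 (by omega)]
    have h := List.drop_eq_getElem_cons (l := P) (i := 0) (by omega)
    simpa using h
  have hmem0 : P[0]! ∈ P := by
    rw [getElem!_pos P 0 ha']
    exact List.getElem_mem _
  have hp01 : 1 ≤ P[0]! := hP1 _ hmem0
  have htail0 : ∀ y ∈ P.drop 1, y ≤ P[0]! := by
    intro y hy
    refine hmemdrop 0 ha' y ?_
    rw [List.drop_zero]
    exact (List.drop_sublist _ _).subset hy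
  have hfP : pvFmax P = P[0]! := by
    conv_lhs => rw [hdrop0]
    exact pvFmax_head _ _ (by omega) htail0
  -- nonnegativity of the day's result
  have hnn : ∀ x ∈ pvStep (P ++ Z) k, 0 ≤ x := by
    rw [hstep]
    intro x hx
    rcases List.mem_append.1 hx with hx | hx
    · obtain ⟨y, hy, rfl⟩ := List.mem_map.1 hx
      have := hP1 y ((List.take_sublist _ _).subset hy)
      omega
    · rcases List.mem_append.1 hx with hx | hx
      · have := hP x ((List.drop_sublist _ _).subset hx)
        omega
      · simp [hZ x hx]
  refine ⟨hnn, ?_, ?_⟩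
  · -- the active-case count
    have hcomp : ((P.take m).map (· - 1)).countP (fun x => decide (0 < x))
        = (P.take m).countP (fun x => decide (1 < x)) := by
      rw [List.countP_map]
      refine List.countP_congr ?_
      intro a _
      simp only [Function.comp_apply, decide_eq_true_eq]
      omega
    have htake1 : ∀ x ∈ P.take m, 1 ≤ x := fun x hx => hP1 x ((List.take_sublist _ _).subset hx)
    have haux := aux_count (P.take m) htake1
    have hlentake : (P.take m).length = m := by
      rw [List.length_take]
      omega
    have hcd : (P.drop m).countP (fun x => decide (0 < x)) = P.length - m := by
      rw [List.countP_eq_length.2 (fun a hamem => by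
            simp [hP a ((List.drop_sublist _ _).subset hamem)]), List.length_drop]
    have hcz : Z.countP (fun x => decide (0 < x)) = 0 :=
      List.countP_eq_zero.2 (fun a hamem => by simp [hZ a hamem])
    have hcP : P.countP (fun x => decide (0 < x)) = P.length :=
      List.countP_eq_length.2 (fun a ha => by simp [hP a ha])
    rw [hm, hstep, htk]
    simp only [List.countP_append]
    omega
  · -- pvG drops by exactly one
    have hsZ : Z.sum = 0 := sum_zero_of Z hZ
    have hsum_s : (P ++ Z).sum = P.sum := by rw [List.sum_append, hsZ, add_zero]
    have hlentake : (P.take m).length = m := by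
      rw [List.length_take]
      omega
    have hsum_td : (P.take m).sum + (P.drop m).sum = P.sum := by
      rw [← List.sum_append, List.take_append_drop]
    have hsum_step : (pvStep (P ++ Z) k).sum = P.sum - m := by
      rw [hstep, List.sum_append, List.sum_append, hsZ, add_zero, sum_map_dec, hlentake]
      omega
    have hfZ : pvFmax Z = 0 := pvFmax_zero Z hZ
    have hfmax_step : pvFmax (pvStep (P ++ Z) k)
        = max (pvFmax ((P.take m).map (· - 1))) (max (pvFmax (P.drop m)) 0) := by
      rw [hstep, pvFmax_append, pvFmax_append, hfZ]
    have hball : ∀ x ∈ P, x ≤ P[0]! := by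
      intro x hx
      obtain ⟨i, hi, rfl⟩ := List.mem_iff_getElem.1 hx
      rw [← getElem!_pos P i hi]
      exact hmono 0 i (by omega) hi
    have hsum_le : P.sum ≤ (P.length : Int) * P[0]! := by
      have h := List.sum_le_card_nsmul P P[0]! hball
      simpa [nsmul_eq_mul] using h
    rcases Nat.lt_or_ge m P.length with hcase | hcase
    · -- m = k < number of active cases
      have hkm : (m : Int) = k := by omega
      -- head of the decremented prefix
      obtain ⟨m', hm'⟩ : ∃ m', m = m' + 1 := ⟨m - 1, by omega⟩
      have htkcons : P.take m = P[0]! :: (P.drop 1).take m' := by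
        conv_lhs => rw [hdrop0]
        rw [hm', List.take_succ_cons]
      have hfm_take : pvFmax ((P.take m).map (· - 1)) = P[0]! - 1 := by
        rw [htkcons, List.map_cons]
        refine pvFmax_head _ _ (by omega) ?_
        intro y hy
        obtain ⟨z, hz, rfl⟩ := List.mem_map.1 hy
        have := htail0 z ((List.take_sublist _ _).subset hz)
        omega
      have hdropm : P.drop m = P[m]! :: P.drop (m + 1) := by
        rw [getElem!_pos P m hcase]
        exact List.drop_eq_getElem_cons hcase
      have hPm1 : 1 ≤ P[m]! := by
        refine hP1 _ ?_
        rw [getElem!_pos P m hcase]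
        exact List.getElem_mem _
      have hfm_drop : pvFmax (P.drop m) = P[m]! := by
        conv_lhs => rw [hdropm]
        refine pvFmax_head _ _ (by omega) ?_
        intro y hy
        have hy' : y ∈ P.drop (m + 1) := hy
        have h2 : P.drop (m + 1) = (P.drop m).drop 1 := by
          rw [List.drop_drop]
        have h3 : y ∈ P.drop m := by
          rw [h2] at hy'
          exact (List.drop_sublist _ _).subset hy'
        exact hmemdrop m hcase y h3
      have hm0 : P[m]! ≤ P[0]! := hmono 0 m (by omega) hcase
      have hcd1 : pvCdiv (P.sum - k) k = pvCdiv P.sum k - 1 := pvCdiv_sub_k _ _ (by omega)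
      unfold pvG
      rw [hsum_step, hfmax_step, hfm_take, hfm_drop, pvFmax_append, hfZ, hfP, hsum_s, hkm, hcd1]
      by_cases hPm : P[m]! = P[0]!
      · -- more than k cases are tied at the maximum: the ceiling term dominates
        have htk1 : (P.take (m + 1)).length = m + 1 := by
          rw [List.length_take]
          omega
        have hsum_take : ((m : Int) + 1) * P[m]! ≤ (P.take (m + 1)).sum := by
          have h := List.card_nsmul_le_sum (P.take (m + 1)) P[m]! (hmemtake m hcase)
          rw [htk1] at h
          simpa [nsmul_eq_mul] using h
        rw [hPm, hkm] at hsum_take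
        have hsum_drop : 0 ≤ (P.drop (m + 1)).sum :=
          List.sum_nonneg (fun x hx => by
            have := hP x ((List.drop_sublist _ _).subset hx)
            omega)
        have hsum_td1 : (P.take (m + 1)).sum + (P.drop (m + 1)).sum = P.sum := by
          rw [← List.sum_append, List.take_append_drop]
        have hlt : P[0]! * k < P.sum := by
          linarith [hsum_take, hsum_drop, hsum_td1, hp01]
        have hcge : P[0]! + 1 ≤ pvCdiv P.sum k := by
          rw [le_pvCdiv_iff _ _ _ (by omega)]
          linarith [hlt]
        omega
      · have hPm' : P[m]! ≤ P[0]! - 1 := by omega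
        omega
    · -- every active case is served: m = number of active cases
      have hmeq : m = P.length := by omega
      have hnk : (P.length : Int) ≤ k := by omega
      have htkall : P.take m = P := by rw [hmeq, List.take_length]
      have hdrall : P.drop m = [] := by rw [hmeq, List.drop_length]
      have hfm_take : pvFmax ((P.take m).map (· - 1)) = P[0]! - 1 := by
        rw [htkall]
        conv_lhs => rw [hdrop0]
        rw [List.map_cons]
        refine pvFmax_head _ _ (by omega) ?_
        intro y hy
        obtain ⟨z, hz, rfl⟩ := List.mem_map.1 hy
        have := htail0 z hz
        omega
      have h1 : pvCdiv P.sum k ≤ P[0]! := by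
        rw [pvCdiv_le_iff _ _ _ (by omega)]
        nlinarith [hsum_le, mul_le_mul_of_nonneg_right hnk (show (0:Int) ≤ P[0]! by omega)]
      have h2 : pvCdiv (P.sum - P.length) k ≤ P[0]! - 1 := by
        rw [pvCdiv_le_iff _ _ _ (by omega)]
        nlinarith [hsum_le, mul_le_mul_of_nonneg_right hnk (show (0:Int) ≤ P[0]! - 1 by omega)]
      unfold pvG
      rw [hsum_step, hfmax_step, hfm_take, hdrall,
        show pvFmax ([] : List Int) = 0 from rfl, pvFmax_append, hfZ, hfP, hsum_s, hmeq]
      omega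

theorem fold_char (s : List Int) (a : Int) (j : Nat) (hj : j ≤ s.length) :
    (PySem.List.pyRange 0 (j : Int) 1).foldl
        (fun (st : List Int × Int) i =>
          let s1 := PySem.List.pySetD st.1 i (PySem.List.pyGetD st.1 i 0 - 1)
          (s1, if PySem.List.pyGetD s1 i 0 = 0 then st.2 - 1 else st.2))
        (s, a)
      = ((s.take j).map (· - 1) ++ s.drop j, a - ((s.take j).count 1 : Int)) := by
  induction j with
  | zero =>
    rw [show ((0:Nat):Int) = 0 from rfl, PySem.List.pyRange_one_eq_nil le_rfl]
    simp
  | succ j ih =>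
    have hlt : j < s.length := hj
    have hA : ((s.take j).map (fun x => x - 1)).length = j := by
      rw [List.length_map, List.length_take]
      omega
    rw [show ((j+1:Nat):Int) = (j:Int) + 1 by push_cast; ring,
      PySem.List.pyRange_one_succ_right (by positivity), List.foldl_append, ih hlt.le]
    simp only [List.foldl_cons, List.foldl_nil]
    have hdrop : s.drop j = s[j] :: s.drop (j+1) := List.drop_eq_getElem_cons hlt
    rw [hdrop]
    simp only [PySem.List.pyGetD_natCast, PySem.List.pySetD_natCast]
    have hget : (((s.take j).map (fun x => x - 1)) ++ s[j] :: s.drop (j+1)).getD j 0 = s[j] := by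
      have h := getD_append_len ((s.take j).map (fun x => x - 1)) (s.drop (j+1)) s[j]
      rw [hA] at h
      exact h
    rw [hget]
    have hset : (((s.take j).map (fun x => x - 1)) ++ s[j] :: s.drop (j+1)).set j (s[j] - 1)
        = ((s.take j).map (fun x => x - 1)) ++ (s[j] - 1) :: s.drop (j+1) := by
      have h := set_append_len ((s.take j).map (fun x => x - 1)) (s.drop (j+1)) s[j] (s[j] - 1)
      rw [hA] at h
      exact h
    rw [hset]
    have hget2 : (((s.take j).map (fun x => x - 1)) ++ (s[j] - 1) :: s.drop (j+1)).getD j 0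
        = s[j] - 1 := by
      have h := getD_append_len ((s.take j).map (fun x => x - 1)) (s.drop (j+1)) (s[j] - 1)
      rw [hA] at h
      exact h
    rw [hget2]
    have htake : s.take (j+1) = s.take j ++ [s[j]] := by
      rw [List.take_add_one]
      simp [List.getElem?_eq_getElem hlt]
    rw [htake]
    simp only [List.map_append, List.map_cons, List.map_nil, List.count_append,
      List.append_assoc, List.cons_append, List.nil_append]
    rw [Prod.mk.injEq]
    refine ⟨rfl, ?_⟩
    by_cases h1 : s[j] = 1
    · simp [h1, List.count_cons]
      omega
    · have h2 : ¬ (s[j] - 1 = 0) := by omega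
      simp [h2, List.count_cons, h1]

theorem loop_eq (k : Int) (hk : 1 ≤ k) : ∀ (fuel : Nat) (s : List Int) (d : Int),
    s.Pairwise (fun a b => b ≤ a) → (∀ x ∈ s, 0 ≤ x) → (pvG s k).toNat ≤ fuel →
    legalbacklogLoop k fuel s ((s.countP (fun x => decide (0 < x)) : Int)) d = d + pvG s k := by
  intro fuel
  induction fuel with
  | zero =>
    intro s d hs h0 hf
    have h1 := pvG_nonneg s k
    have h2 : pvG s k = 0 := by omega
    simp [legalbacklogLoop, h2]
  | succ fuel ih =>
    intro s d hs h0 hf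
    by_cases hcp : 0 < s.countP (fun x => decide (0 < x))
    · obtain ⟨h0', hcnt, hG⟩ := day_step s k hs h0 hk hcp
      have hmlen : pvM s k ≤ s.length := by
        have h1 : pvM s k ≤ s.countP (fun x => decide (0 < x)) := by unfold pvM; omega
        have h2 := List.countP_le_length (p := fun x => decide (0 < x)) (l := s)
        omega
      have hminr : min ((s.countP (fun x => decide (0 < x)) : Int)) k
          = ((pvM s k : Nat) : Int) := by
        unfold pvM
        omega
      rw [legalbacklogLoop, if_pos (by exact_mod_cast hcp), hminr,
        fold_char s _ (pvM s k) hmlen]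
      have hperm : (PySem.List.sorted (pvStep s k) (fun x => x) true).Perm (pvStep s k) :=
        PySem.List.sorted_perm _ _ _
      have hst : (PySem.List.sorted (pvStep s k) (fun x => x) true).Pairwise
          (fun a b => b ≤ a) := by
        simpa using PySem.List.sorted_pairwise_rev (pvStep s k) (fun x => x)
      have h0t : ∀ x ∈ PySem.List.sorted (pvStep s k) (fun x => x) true, 0 ≤ x :=
        fun x hx => h0' x (hperm.mem_iff.1 hx)
      have hcntt : (PySem.List.sorted (pvStep s k) (fun x => x) true).countP
          (fun x => decide (0 < x)) = (pvStep s k).countP (fun x => decide (0 < x)) :=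
        hperm.countP_eq _
      have hGt : pvG (PySem.List.sorted (pvStep s k) (fun x => x) true) k = pvG s k - 1 :=
        (pvG_perm _ _ k hperm).trans hG
      have hG1 : 1 ≤ pvG s k := by
        obtain ⟨x, hx, hpx⟩ := List.countP_pos_iff.1 hcp
        have hx1 : (1:Int) ≤ x := by
          have := of_decide_eq_true hpx
          omega
        have h3 := le_pvFmax s x hx
        have h4 := le_max_left (pvFmax s) (pvCdiv s.sum k)
        unfold pvG
        omega
      have harg : (s.countP (fun x => decide (0 < x)) : Int)
            - ((s.take (pvM s k)).count 1 : Int)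
          = ((PySem.List.sorted (pvStep s k) (fun x => x) true).countP
              (fun x => decide (0 < x)) : Int) := by
        rw [hcntt]
        omega
      have hf' : (pvG (PySem.List.sorted (pvStep s k) (fun x => x) true) k).toNat ≤ fuel := by
        rw [hGt]
        omega
      show legalbacklogLoop k fuel (PySem.List.sorted (pvStep s k) (fun x => x) true)
        ((s.countP (fun x => decide (0 < x)) : Int) - ((s.take (pvM s k)).count 1 : Int)) (d + 1)
        = d + pvG s k
      rw [harg, ih _ (d + 1) hst h0t hf', hGt]
      omega
    · have h0c : s.countP (fun x => decide (0 < x)) = 0 := by omega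
      have hall : ∀ x ∈ s, x = 0 := by
        intro x hx
        have h1 := List.countP_eq_zero.1 h0c x hx
        have h2 := h0 x hx
        simp at h1
        omega
      have hG0 : pvG s k = 0 := by
        rw [pvG, pvFmax_zero s hall, sum_zero_of s hall, pvCdiv_zero k (by omega)]
        simp
      rw [h0c, hG0, legalbacklogLoop]
      simp

-- ===== VERDICT (by name: the statement is the Claim_ definition above) =====
theorem legalbacklog_spec : Claim_equal_legalbacklog := by
  intro cases k hdom hpre
  obtain ⟨hk0, hvals⟩ := hpre
  show legalbacklog cases k = legalbacklog_alt cases k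
  simp only [legalbacklog, legalbacklog_alt]
  cases hv : (PySem.Dict.ofList cases).values with
  | nil =>
    rw [show PySem.List.sorted ([] : List Int) (fun x => x) true = [] from rfl]
    simp [legalbacklogLoop]
  | cons h t =>
    have hk : 1 ≤ k := by
      rcases hk0 with h0 | h1
      · subst h0
        rw [show (PySem.Dict.ofList ([] : List (String × Int))).values = [] from rfl] at hv
        cases hv
      · exact h1
    have hv1 : ∀ v ∈ h :: t, 1 ≤ v := by
      rw [← hv]
      exact hvals
    have hS := PySem.List.sorted_perm (h :: t) (fun x => x) true
    have hsort : (PySem.List.sorted (h :: t) (fun x => x) true).Pairwise (fun a b => b ≤ a) := by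
      simpa using PySem.List.sorted_pairwise_rev (h :: t) (fun x => x)
    have h1S : ∀ x ∈ PySem.List.sorted (h :: t) (fun x => x) true, 1 ≤ x :=
      fun x hx => hv1 x (hS.mem_iff.1 hx)
    have h0S : ∀ x ∈ PySem.List.sorted (h :: t) (fun x => x) true, 0 ≤ x :=
      fun x hx => by have := h1S x hx; omega
    have hSlen : (PySem.List.sorted (h :: t) (fun x => x) true).countP (fun x => decide (0 < x))
        = (PySem.List.sorted (h :: t) (fun x => x) true).length :=
      List.countP_eq_length.2 (fun a hamem => by
        have := h1S a hamem
        simp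
        omega)
    have hsum_nn : 0 ≤ (PySem.List.sorted (h :: t) (fun x => x) true).sum :=
      List.sum_nonneg h0S
    have hG_le : pvG (PySem.List.sorted (h :: t) (fun x => x) true) k
        ≤ (PySem.List.sorted (h :: t) (fun x => x) true).sum := by
      have hf := pvFmax_le (PySem.List.sorted (h :: t) (fun x => x) true) _ hsum_nn
        (fun x hx => List.single_le_sum h0S x hx)
      have hcd : pvCdiv (PySem.List.sorted (h :: t) (fun x => x) true).sum k
          ≤ (PySem.List.sorted (h :: t) (fun x => x) true).sum := by
        rw [pvCdiv_le_iff _ _ _ (by omega)]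
        nlinarith
      unfold pvG
      omega
    have hfuel : (pvG (PySem.List.sorted (h :: t) (fun x => x) true) k).toNat
        ≤ ((PySem.List.sorted (h :: t) (fun x => x) true).map Int.toNat).sum + 1 := by
      have := sum_toNat_eq (PySem.List.sorted (h :: t) (fun x => x) true) h0S
      omega
    rw [show ((PySem.List.sorted (h :: t) (fun x => x) true).length : Int)
        = ((PySem.List.sorted (h :: t) (fun x => x) true).countP
            (fun x => decide (0 < x)) : Int)
        by rw [hSlen]]
    rw [loop_eq k hk _ _ 0 hsort h0S hfuel]
    simp only [List.isEmpty_cons, Bool.false_eq_true, if_false, PySem.List.max?_id_cons,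
      Option.getD_some]
    have hGperm : pvG (PySem.List.sorted (h :: t) (fun x => x) true) k = pvG (h :: t) k :=
      pvG_perm _ _ k hS
    have hfoldl : pvFmax (h :: t) = t.foldl max h := by
      have hbl := PySem.List.le_foldl_max t h
      refine le_antisymm ?_ ?_
      · refine pvFmax_le _ _ (by have := hv1 h (by simp); omega) ?_
        intro x hx
        rcases List.mem_cons.1 hx with rfl | hx
        · exact hbl.1
        · exact hbl.2 x hx
      · rcases PySem.List.foldl_max_mem t h with heq | hmem
        · rw [heq]
          exact le_pvFmax _ _ (by simp)
        · exact le_pvFmax _ _ (by simp [hmem])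
    rw [hGperm, pvG, hfoldl, pvCdiv]
    omega
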